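-- pv_equiv track=rewrite | github.com/KornevL/learning_python | week8and9/testersdemo.py | solution
-- ===== SOURCE A (Python) =====
-- def solution(A):
--     num_of_castles = 0
--     step_left = -1
--     A.append(A[-1])
--     for i in range(len(A) - 1):
--         step = int(A[i + 1]) - int(A[i])
--         if step != 0:
--             if step > 0:
--                 step_right = 1
--             else:
--                 step_right = 0
--             if (step_right != step_left) or (step_left == -1):
--                 num_of_castles += 1
--                 step_left = step_right
--     return num_of_castles + 1
-- ===== SOURCE B (Python) =====
-- def solution(A):
--     A.append(A[-1])  # same in-place mutation as the original (no effect on the value)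
--     # stage 1: collapse runs of equal neighbours into one element
--     u = A[:1] + [y for x, y in zip(A, A[1:]) if y != x]
--     if len(u) < 2:
--         return 1
--     # stage 2: on the collapsed strictly-zigzag-or-monotone list, every interior
--     # local extremum (peak or valley) separates two monotone runs
--     return 2 + sum((b > a) != (c > b) for a, b, c in zip(u, u[1:], u[2:]))
-- ===== Notes on version B (the rewrite author's own statement) =====
-- stated objective: simpler
-- what changed: A's single fused loop threading step_left/num_of_castles state is replaced by two stages: collapse equal neighbours into a deduplicated list, then count interior local extrema (peaks/valleys) by a stateless scan of value triples, returning extrema + 2; B performs the same in-place append as A.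
import Mathlib
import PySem

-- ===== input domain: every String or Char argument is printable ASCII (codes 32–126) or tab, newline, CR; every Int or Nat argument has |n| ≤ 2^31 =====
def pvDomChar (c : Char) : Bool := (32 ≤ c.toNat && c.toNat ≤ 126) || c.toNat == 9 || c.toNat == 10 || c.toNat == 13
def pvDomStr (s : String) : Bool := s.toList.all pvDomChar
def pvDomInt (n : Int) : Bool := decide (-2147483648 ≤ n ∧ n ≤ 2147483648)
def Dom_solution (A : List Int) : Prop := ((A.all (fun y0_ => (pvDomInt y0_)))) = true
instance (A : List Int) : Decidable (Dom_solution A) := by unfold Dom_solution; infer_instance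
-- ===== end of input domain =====

-- B replaces A's fused stateful loop by two stages — collapse equal neighbours, then count
-- interior local extrema over value triples — a simpler stateless decomposition; B performs
-- the same in-place append on its argument as A.

-- ===== PORT A =====
def solution (A : List Int) : Int :=
  -- A.append(A[-1]): reading the last element of an empty list raises IndexError (excluded by Pre_)
  match PySem.List.pyGet? A (-1) with
  | none => 0
  | some lastv =>
    let A2 := A ++ [lastv]
    let r := (PySem.List.pyRange 0 ((A2.length : Int) - 1) 1).foldl
      (fun (st : Int × Int) i =>
        let step := PySem.List.pyGetD A2 (i + 1) 0 - PySem.List.pyGetD A2 i 0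
        if step ≠ 0 then
          let step_right : Int := if step > 0 then 1 else 0
          if step_right ≠ st.2 ∨ st.2 = -1 then (st.1 + 1, step_right) else st
        else st)
      ((0 : Int), (-1 : Int))
    r.1 + 1

-- ===== PORT B =====
def solution_alt (A : List Int) : Int :=
  -- A.append(A[-1]): same IndexError on the empty list (excluded by Pre_)
  match PySem.List.pyGet? A (-1) with
  | none => 0
  | some lastv =>
    let A2 := A ++ [lastv]
    let u := PySem.List.slice A2 none (some 1) ++
      ((A2.zip (A2.drop 1)).filter (fun p => decide (p.2 ≠ p.1))).map Prod.snd
    if u.length < 2 then 1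
    else 2 + (((u.zip (u.drop 1)).zip (u.drop 2)).countP
        (fun p => decide ((p.1.2 > p.1.1) ≠ (p.2 > p.1.2))) : Int)

-- ===== PRECONDITION & SPEC =====
-- Pre_ excludes only the empty list, on which A (and B) raise IndexError reading the last element.
def Pre_solution (A : List Int) : Prop := A ≠ []
instance (A : List Int) : Decidable (Pre_solution A) := by unfold Pre_solution; infer_instance
def pvWitness_solution : List Int := [1, 3, 2]

def Spec_solution (A : List Int) (out : Int) : Prop := out = solution_alt A
instance (A : List Int) (out : Int) : Decidable (Spec_solution A out) := by unfold Spec_solution; infer_instance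

-- ===== CLAIM (what is proved, stated in full; the proofs are below) =====
def Claim_equal_solution : Prop := ∀ (A : List Int), Dom_solution A → Pre_solution A → Spec_solution A (solution A)

-- ===== LEMMAS AND PROOFS =====

-- A's loop body, as a function of the state and the adjacent pair (A[i], A[i+1])
def aStep (st : Int × Int) (p : Int × Int) : Int × Int :=
  let step := p.2 - p.1
  if step ≠ 0 then
    let step_right : Int := if step > 0 then 1 else 0
    if step_right ≠ st.2 ∨ st.2 = -1 then (st.1 + 1, step_right) else st
  else st

-- A's loop body restricted to a nonzero step of direction b
def sStep (st : Int × Int) (b : Bool) : Int × Int :=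
  let sr : Int := if b then 1 else 0
  if sr ≠ st.2 ∨ st.2 = -1 then (st.1 + 1, sr) else st

-- index loop over range(len-1) = fold over the list of adjacent pairs (Nat level)
lemma foldRange_pairs {σ : Type} (g : σ → Int → Int → σ) :
    ∀ (t : List Int) (x : Int) (init : σ),
    (List.range t.length).foldl (fun s k => g s ((x::t).getD k 0) ((x::t).getD (k+1) 0)) init
    = ((x::t).zip t).foldl (fun s p => g s p.1 p.2) init
  | [], x, init => by simp
  | y :: t', x, init => by
      rw [List.length_cons, List.range_succ_eq_map]
      simp only [List.foldl_cons, List.foldl_map, List.getD_cons_zero, List.getD_cons_succ,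
        List.zip_cons_cons]
      exact foldRange_pairs g t' y (g init x y)

-- same at the Int/pyRange/pyGetD level, matching port A's loop
lemma foldIdx_pairs {σ : Type} (g : σ → Int → Int → σ) (t : List Int) (x : Int) (init : σ) :
    (PySem.List.pyRange 0 (((x::t).length : Int) - 1) 1).foldl
      (fun s i => g s (PySem.List.pyGetD (x::t) i 0) (PySem.List.pyGetD (x::t) (i+1) 0)) init
    = ((x::t).zip t).foldl (fun s p => g s p.1 p.2) init := by
  have hlen : (((x::t).length : Int) - 1) = (t.length : Int) := by
    simp [List.length_cons]
  rw [hlen, PySem.List.pyRange_zero_natCast, List.foldl_map]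
  have hbody : (fun (s : σ) (k : Nat) =>
      g s (PySem.List.pyGetD (x::t) (k : Int) 0) (PySem.List.pyGetD (x::t) ((k : Int) + 1) 0))
      = (fun s k => g s ((x::t).getD k 0) ((x::t).getD (k+1) 0)) := by
    funext s k
    have h1 : ((k : Int) + 1) = ((k + 1 : Nat) : Int) := by push_cast; ring
    rw [h1, PySem.List.pyGetD_natCast, PySem.List.pyGetD_natCast]
  rw [hbody, foldRange_pairs]

-- skipping zero steps in A's loop = folding sStep over the filtered direction list
lemma fold_signs : ∀ (P : List (Int × Int)) (st : Int × Int),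
    P.foldl aStep st
    = ((P.filter (fun p => decide (p.2 ≠ p.1))).map (fun p => decide (p.2 > p.1))).foldl sStep st
  | [], st => by simp
  | p :: P', st => by
      by_cases h : p.2 = p.1
      · have : aStep st p = st := by simp [aStep, h]
        simp [h, this, fold_signs P' st]
      · have hstep : p.2 - p.1 ≠ 0 := by omega
        have hpos : (p.2 - p.1 > 0) = (p.2 > p.1) := by
          apply propext; omega
        have : aStep st p = sStep st (decide (p.2 > p.1)) := by
          simp only [aStep, sStep, if_pos hstep, hpos]
          by_cases hb : p.2 > p.1 <;> simp [hb]
        simp only [List.foldl_cons, List.filter_cons, this]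
        simp [h, fold_signs P' (sStep st (decide (p.2 > p.1)))]

def enc (b : Bool) : Int := if b then 1 else 0

lemma fold_count_aux : ∀ (bs : List Bool) (b : Bool) (c : Int),
    (bs.foldl sStep (c, enc b)).1
    = c + ((((b :: bs).zip bs).filter (fun p => decide (p.1 ≠ p.2))).length : Int)
  | [], b, c => by simp
  | b' :: bs', b, c => by
      have hne : enc b ≠ -1 := by cases b <;> simp [enc]
      by_cases h : b' = b
      · have hstep : sStep (c, enc b) b' = (c, enc b') := by
          subst h
          cases b' <;> simp [sStep, enc]
        rw [List.foldl_cons, hstep, fold_count_aux bs' b' c]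
        subst h
        simp [List.zip_cons_cons]
      · have hd : enc b' ≠ enc b := by cases b <;> cases b' <;> simp_all [enc]
        have hstep : sStep (c, enc b) b' = (c + 1, enc b') := by
          simp [sStep, enc] at hd ⊢
          cases b' <;> simp_all [enc]
        rw [List.foldl_cons, hstep, fold_count_aux bs' b' (c + 1)]
        have : b ≠ b' := fun hh => h hh.symm
        simp [List.zip_cons_cons, this]
        ring

lemma fold_count (bs : List Bool) :
    (bs.foldl sStep ((0 : Int), (-1 : Int))).1
    = (if bs = [] then 0
       else 1 + (((bs.zip (bs.drop 1)).filter (fun p => decide (p.1 ≠ p.2))).length : Int)) := by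
  cases bs with
  | nil => simp
  | cons b rest =>
      have hstep : sStep ((0 : Int), (-1 : Int)) b = (1, enc b) := by
        simp [sStep, enc]
      rw [List.foldl_cons, hstep, fold_count_aux rest b 1]
      simp

-- appending a copy of the last element appends the pair (last, last)
lemma zip_snoc : ∀ (t : List Int) (x a : Int),
    ((x :: t) ++ [a]).zip (t ++ [a])
    = (x :: t).zip t ++ [((x :: t).getLast (List.cons_ne_nil x t), a)]
  | [], x, a => by simp
  | y :: t', x, a => by
      have := zip_snoc t' y a
      simp only [List.cons_append, List.zip_cons_cons] at this ⊢
      rw [this, List.getLast_cons (List.cons_ne_nil y t')]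

-- B's collapsed list chains: its adjacent pairs are exactly the nonzero-step pairs of the input
lemma chain_pairs : ∀ (t : List Int) (a : Int),
    (a :: (((a :: t).zip t).filter (fun p => decide (p.2 ≠ p.1))).map Prod.snd).zip
      ((((a :: t).zip t).filter (fun p => decide (p.2 ≠ p.1))).map Prod.snd)
    = ((a :: t).zip t).filter (fun p => decide (p.2 ≠ p.1))
  | [], a => by simp
  | b :: t', a => by
      by_cases h : b = a
      · subst h
        simpa using chain_pairs t' b
      · have hd : ((b : Int), b).1 ≠ a := h
        have := chain_pairs t' b
        simp only [List.zip_cons_cons, List.filter_cons, decide_eq_true_eq] at this ⊢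
        simp only [if_pos h, List.map_cons, List.zip_cons_cons]
        rw [this]

-- counting over value triples = counting over adjacent pairs of the pair list
lemma triple_pair_count : ∀ (u : List Int),
    ((u.zip (u.drop 1)).zip (u.drop 2)).countP
        (fun p => decide ((p.1.2 > p.1.1) ≠ (p.2 > p.1.2)))
    = ((u.zip (u.drop 1)).zip ((u.zip (u.drop 1)).drop 1)).countP
        (fun q => decide ((q.1.2 > q.1.1) ≠ (q.2.2 > q.2.1)))
  | [] => rfl
  | [_] => rfl
  | [_, _] => rfl
  | a :: b :: c :: r => by
      have ih := triple_pair_count (b :: c :: r)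
      simp only [List.drop_succ_cons, List.drop_zero, List.zip_cons_cons, List.countP_cons] at ih ⊢
      omega

-- pair-list count of direction changes = filter-length over the direction (sign) list
lemma signs_count (F : List (Int × Int)) :
    (((F.map (fun p => decide (p.2 > p.1))).zip
        ((F.map (fun p => decide (p.2 > p.1))).drop 1)).filter
        (fun p => decide (p.1 ≠ p.2))).length
    = (F.zip (F.drop 1)).countP (fun q => decide ((q.1.2 > q.1.1) ≠ (q.2.2 > q.2.1))) := by
  rw [← List.countP_eq_length_filter, ← List.map_drop, List.zip_map, List.countP_map]
  apply List.countP_congr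
  intro q _
  by_cases h1 : q.1.2 > q.1.1 <;> by_cases h2 : q.2.2 > q.2.1 <;>
    simp [Function.comp, h1, h2]

-- ===== VERDICT (by name: the statement is the Claim_ definition above) =====
theorem solution_spec : Claim_equal_solution := by
  intro A _ hPre
  unfold Spec_solution
  cases A with
  | nil => exact absurd rfl hPre
  | cons x t =>
    set g : Int := (x :: t).getLast (List.cons_ne_nil x t) with hg
    have hget : PySem.List.pyGet? (x :: t) (-1) = some g := by
      rw [PySem.List.pyGet?_neg_one, List.getLast?_eq_some_getLast (List.cons_ne_nil x t)]
    set F : List (Int × Int) := ((x :: t).zip t).filter (fun p => decide (p.2 ≠ p.1)) with hFdef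
    set signs : List Bool := F.map (fun p => decide (p.2 > p.1)) with hsigns
    -- reduce port A to a fold of aStep over the pairs of (x::t) ++ [g]
    have hA : solution (x :: t)
        = ((((x :: t) ++ [g]).zip ((t ++ [g]))).foldl aStep ((0 : Int), (-1 : Int))).1 + 1 := by
      show (match PySem.List.pyGet? (x :: t) (-1) with
        | none => (0 : Int)
        | some lastv =>
          let A2 := (x :: t) ++ [lastv]
          let r := (PySem.List.pyRange 0 ((A2.length : Int) - 1) 1).foldl
            (fun (st : Int × Int) i =>
              let step := PySem.List.pyGetD A2 (i + 1) 0 - PySem.List.pyGetD A2 i 0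
              if step ≠ 0 then
                let step_right : Int := if step > 0 then 1 else 0
                if step_right ≠ st.2 ∨ st.2 = -1 then (st.1 + 1, step_right) else st
              else st)
            ((0 : Int), (-1 : Int))
          r.1 + 1) = _
      rw [hget]
      show ((PySem.List.pyRange 0 (((x :: (t ++ [g])).length : Int) - 1) 1).foldl
            (fun (st : Int × Int) i =>
              aStep st (PySem.List.pyGetD (x :: (t ++ [g])) i 0,
                        PySem.List.pyGetD (x :: (t ++ [g])) (i + 1) 0))
            ((0 : Int), (-1 : Int))).1 + 1 = _
      rw [foldIdx_pairs (fun s xv yv => aStep s (xv, yv)) (t ++ [g]) x]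
      rfl
    have hlast : (((x :: t).zip t ++ [(g, g)]).filter (fun p => decide (p.2 ≠ p.1))) = F := by
      simp [hFdef, List.filter_append]
    have hAval : solution (x :: t)
        = (if signs = [] then 0
           else 1 + (((signs.zip (signs.drop 1)).filter (fun p => decide (p.1 ≠ p.2))).length : Int))
          + 1 := by
      rw [hA, zip_snoc, fold_signs, hlast, ← hsigns, fold_count]
    -- reduce port B to the collapsed list u = x :: F.map Prod.snd
    have hslice : PySem.List.slice ((x :: t) ++ [g]) none (some 1) = [x] := by
      have h1 : (1 : Int) = ((1 : Nat) : Int) := by norm_num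
      rw [h1, PySem.List.slice_to_natCast]
      simp
    have hpairsB : ((x :: t) ++ [g]).zip ((((x :: t) ++ [g]).drop 1)) 
        = (x :: t).zip t ++ [(g, g)] := by
      have : ((x :: t) ++ [g]).drop 1 = t ++ [g] := by simp
      rw [this, zip_snoc, ← hg]
    have hB : solution_alt (x :: t)
        = (if (x :: F.map Prod.snd).length < 2 then 1
           else 2 + ((((x :: F.map Prod.snd).zip ((x :: F.map Prod.snd).drop 1)).zip
              ((x :: F.map Prod.snd).drop 2)).countP
              (fun p => decide ((p.1.2 > p.1.1) ≠ (p.2 > p.1.2))) : Int)) := by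
      show (match PySem.List.pyGet? (x :: t) (-1) with
        | none => (0 : Int)
        | some lastv =>
          let A2 := (x :: t) ++ [lastv]
          let u := PySem.List.slice A2 none (some 1) ++
            ((A2.zip (A2.drop 1)).filter (fun (p : Int × Int) => decide (p.2 ≠ p.1))).map Prod.snd
          if u.length < 2 then 1
          else 2 + (((u.zip (u.drop 1)).zip (u.drop 2)).countP
              (fun (p : (Int × Int) × Int) => decide ((p.1.2 > p.1.1) ≠ (p.2 > p.1.2))) : Int)) = _
      rw [hget]
      simp only [hslice, hpairsB, hlast, List.singleton_append]
    rw [hAval, hB]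
    by_cases hFnil : F = []
    · simp [hFnil, hsigns]
    · have hlen : ¬ (x :: F.map Prod.snd).length < 2 := by
        have : F.length ≠ 0 := by simpa using hFnil
        simp only [List.length_cons, List.length_map]
        omega
      have hsne : signs ≠ [] := by simp [hsigns, hFnil]
      rw [if_neg hlen, if_neg hsne]
      have hzip : (x :: F.map Prod.snd).zip ((x :: F.map Prod.snd).drop 1) = F := by
        simpa [hFdef] using chain_pairs t x
      rw [triple_pair_count, hzip]
      rw [hsigns, signs_count]
      ring
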